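-- pv_equiv track=rewrite | github.com/benearnthof/rsbookclub-datadumps | nlp/clean_single_task.py | build_offset_map
-- ===== SOURCE A (Python) =====
-- def build_offset_map(text, removed_spans):
--     """
--     Build a character-level map: old index → new index (None if removed).
--     """
--     removed = bytearray(len(text))
--     for start, end in removed_spans:
--         for i in range(start, end):
--             removed[i] = 1
--
--     offset_map = []
--     new_pos = 0
--     for is_removed in removed:
--         if is_removed:
--             offset_map.append(None)
--         else:
--             offset_map.append(new_pos)
--             new_pos += 1
--     offset_map.append(new_pos)  # sentinel
--     return offset_map
-- ===== SOURCE B (Python) =====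
-- def build_offset_map(text, removed_spans):
--     """
--     Build a character-level map: old index -> new index (None if removed),
--     via a difference array and one running-sum sweep.
--     """
--     n = len(text)
--     delta = [0] * (n + 1)
--     for start, end in removed_spans:
--         s = max(start, 0)
--         e = min(end, n)
--         if s < e:
--             delta[s] += 1
--             delta[e] -= 1
--     offset_map = []
--     new_pos = 0
--     active = 0
--     for d in delta[:n]:
--         active += d
--         if active > 0:
--             offset_map.append(None)
--         else:
--             offset_map.append(new_pos)
--             new_pos += 1
--     offset_map.append(new_pos)  # sentinel
--     return offset_map
-- ===== Notes on version B (the rewrite author's own statement) =====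
-- stated objective: alternative
-- what changed: Replaces the per-character marking of a byte array (touching every index of every span) by a difference array updated in O(1) per span plus one running-sum sweep over the text.
-- outside the precondition, e.g. on build_offset_map('abc', [(4, 5)]): A raises IndexError, B returns [0, 1, 2, 3]; on build_offset_map('abc', [(-1, 1)]): A returns [None, 0, None, 1], B returns [None, 0, 1, 2]
import Mathlib
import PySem

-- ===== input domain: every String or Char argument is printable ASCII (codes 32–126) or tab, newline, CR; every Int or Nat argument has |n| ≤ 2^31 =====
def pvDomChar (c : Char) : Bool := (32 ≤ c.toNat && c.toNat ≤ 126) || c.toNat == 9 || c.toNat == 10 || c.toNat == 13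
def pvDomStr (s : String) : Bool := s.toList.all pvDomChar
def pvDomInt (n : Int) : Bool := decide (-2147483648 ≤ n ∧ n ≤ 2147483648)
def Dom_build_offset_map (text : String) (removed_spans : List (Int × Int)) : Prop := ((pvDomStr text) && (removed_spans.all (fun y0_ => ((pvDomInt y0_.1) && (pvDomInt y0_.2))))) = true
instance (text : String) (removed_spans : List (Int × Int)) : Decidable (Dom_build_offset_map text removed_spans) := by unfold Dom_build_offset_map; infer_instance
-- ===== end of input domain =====

-- B replaces A's per-character span marking by a difference array + running-sum sweep (alternative decomposition).
-- Pre_ restricts spans to the text's index range: outside it A raises IndexError (end past the text)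
-- or relies on Python's negative-index wraparound on a malformed negative start.

-- ===== PORT A =====
-- 'removed[i] = 1' over 'range(start, end)'; Option models IndexError (none) as in the Python.
def pvMark (acc : Option (List Nat)) (s e : Int) : Option (List Nat) :=
  (PySem.List.pyRange s e 1).foldl
    (fun a i => a.bind (fun l => PySem.List.pySet? l i 1)) acc

-- the second for-loop of A, appending to offset_map with the running new_pos
def pvEmitA : List Nat → Int → List (Option Int)
  | [], np => [some np]
  | b :: rest, np =>
    if b ≠ 0 then none :: pvEmitA rest np else some np :: pvEmitA rest (np + 1)

def build_offset_map (text : String) (removed_spans : List (Int × Int)) : List (Option Int) :=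
  let n := text.toList.length
  match removed_spans.foldl (fun a p => pvMark a p.1 p.2) (some (List.replicate n 0)) with
  | none => []          -- IndexError in A; excluded by Pre_
  | some removed => pvEmitA removed 0

-- ===== PORT B =====
-- one span's clamped difference-array update (delta[s] += 1; delta[e] -= 1)
def pvDeltaStep (n : Nat) (d : List Int) (p : Int × Int) : List Int :=
  let s := max p.1 0
  let e := min p.2 (n : Int)
  if s < e then (d.modify s.toNat (· + 1)).modify e.toNat (· - 1) else d

-- the sweep over delta[:n] carrying (active, new_pos)
def pvEmitB : List Int → Int → Int → List (Option Int)
  | [], _, np => [some np]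
  | d :: rest, active, np =>
    let a := active + d
    if a > 0 then none :: pvEmitB rest a np else some np :: pvEmitB rest a (np + 1)

def build_offset_map_alt (text : String) (removed_spans : List (Int × Int)) : List (Option Int) :=
  let n := text.toList.length
  let delta := removed_spans.foldl (pvDeltaStep n) (List.replicate (n + 1) 0)
  pvEmitB (delta.take n) 0 0

-- ===== PRECONDITION & SPEC =====
-- Pre_ excludes spans reaching outside the text: with end > len(text) A raises IndexError, and a
-- negative start (malformed input for a span remover) makes A's bytearray index wrap around to the
-- end of the text; B clamps such spans to the text instead.
def Pre_build_offset_map (text : String) (removed_spans : List (Int × Int)) : Prop :=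
  ∀ p ∈ removed_spans, p.1 < p.2 → 0 ≤ p.1 ∧ p.2 ≤ (text.toList.length : Int)

instance (text : String) (removed_spans : List (Int × Int)) : Decidable (Pre_build_offset_map text removed_spans) := by
  unfold Pre_build_offset_map; infer_instance

def pvWitness_build_offset_map : String × (List (Int × Int)) := ("abcde", [(0, 2), (1, 3), (4, 4)])

def Spec_build_offset_map (text : String) (removed_spans : List (Int × Int)) (out : List (Option Int)) : Prop := out = build_offset_map_alt text removed_spans
instance (text : String) (removed_spans : List (Int × Int)) (out : List (Option Int)) : Decidable (Spec_build_offset_map text removed_spans out) := by unfold Spec_build_offset_map; infer_instance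

-- ===== CLAIM (what is proved, stated in full; the proofs are below) =====
def Claim_equal_build_offset_map : Prop := ∀ (text : String) (removed_spans : List (Int × Int)), Dom_build_offset_map text removed_spans → Pre_build_offset_map text removed_spans → Spec_build_offset_map text removed_spans (build_offset_map text removed_spans)

-- ===== LEMMAS AND PROOFS =====

-- number of spans covering index i
def pvCov (spans : List (Int × Int)) (i : Int) : Nat :=
  spans.countP (fun p => decide (p.1 ≤ i ∧ i < p.2))

-- prefix sum of the difference array
def pvPsum (d : List Int) (m : Nat) : Int := (d.take m).sum

lemma pvPsum_modify (d : List Int) (j m : Nat) (c : Int) :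
    j < d.length →
    pvPsum (d.modify j (· + c)) m = pvPsum d m + (if j < m then c else 0) := by
  induction d generalizing j m with
  | nil => intro h; simp at h
  | cons x xs ih =>
    intro h
    cases j with
    | zero =>
      cases m with
      | zero => simp [pvPsum]
      | succ k => simp [pvPsum, List.modify]; ring
    | succ j' =>
      cases m with
      | zero => simp [pvPsum]
      | succ k =>
        have := ih j' k (by simpa using h)
        simp [pvPsum, List.modify] at this ⊢
        omega

lemma pvMark_spec (L : List Nat) (s e : Int)
    (h : s < e → 0 ≤ s ∧ e ≤ (L.length : Int)) :
    ∃ L', pvMark (some L) s e = some L' ∧ L'.length = L.length ∧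
      ∀ i : Nat, L'.getD i 0 = if s ≤ (i : Int) ∧ (i : Int) < e then 1 else L.getD i 0 := by
  suffices H : ∀ (m : Nat) (s : Int) (L : List Nat), (e - s).toNat = m →
      (s < e → 0 ≤ s ∧ e ≤ (L.length : Int)) →
      ∃ L', pvMark (some L) s e = some L' ∧ L'.length = L.length ∧
        ∀ i : Nat, L'.getD i 0 = if s ≤ (i : Int) ∧ (i : Int) < e then 1 else L.getD i 0 by
    exact H (e - s).toNat s L rfl h
  intro m
  induction m with
  | zero =>
    intro s L hm _
    have hse : e ≤ s := by omega
    have hr : PySem.List.pyRange s e 1 = [] := by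
      rw [PySem.List.pyRange_one]
      have : (e - s).toNat = 0 := by omega
      simp [this]
    refine ⟨L, by simp [pvMark, hr], rfl, ?_⟩
    intro i
    have : ¬ (s ≤ (i : Int) ∧ (i : Int) < e) := by omega
    simp [this]
  | succ m ih =>
    intro s L hm h
    have hse : s < e := by omega
    obtain ⟨hs0, hel⟩ := h hse
    have hsl : s.toNat < L.length := by omega
    have hset : PySem.List.pySet? L s 1 = some (L.set s.toNat 1) := by
      rw [show s = ((s.toNat : Nat) : Int) by omega]
      exact PySem.List.pySet?_natCast L s.toNat 1 hsl
    have hr : PySem.List.pyRange s e 1 = s :: PySem.List.pyRange (s + 1) e 1 :=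
      PySem.List.pyRange_one_cons hse
    have hstep : pvMark (some L) s e = pvMark (some (L.set s.toNat 1)) (s + 1) e := by
      simp [pvMark, hr, hset]
    obtain ⟨L', h1, h2, h3⟩ := ih (s + 1) (L.set s.toNat 1) (by omega)
      (fun _ => ⟨by omega, by simpa using hel⟩)
    refine ⟨L', by rw [hstep]; exact h1, by simpa using h2, ?_⟩
    intro i
    rw [h3 i]
    have hget : (L.set s.toNat 1).getD i 0 = if i = s.toNat then 1 else L.getD i 0 := by
      by_cases hi : i = s.toNat
      · subst hi; simp [List.getD, hsl]
      · simp [List.getD, hi, (show ¬ s.toNat = i from fun h => hi h.symm)]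
    rw [hget]
    split_ifs <;> omega

lemma pvMarkAll_spec (n : Nat) (spans : List (Int × Int)) (L : List Nat)
    (hL : L.length = n)
    (hpre : ∀ p ∈ spans, p.1 < p.2 → 0 ≤ p.1 ∧ p.2 ≤ (n : Int)) :
    ∃ L', spans.foldl (fun a p => pvMark a p.1 p.2) (some L) = some L' ∧
      L'.length = n ∧
      ∀ i : Nat, (L'.getD i 0 ≠ 0 ↔ (L.getD i 0 ≠ 0 ∨ 0 < pvCov spans (i : Int))) := by
  induction spans generalizing L with
  | nil =>
    exact ⟨L, rfl, hL, fun i => by simp [pvCov]⟩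
  | cons p rest ih =>
    obtain ⟨L1, hm, hlen1, hpt1⟩ := pvMark_spec L p.1 p.2
      (fun hlt => by
        obtain ⟨h1, h2⟩ := hpre p (List.mem_cons_self) hlt
        exact ⟨h1, by rw [hL]; exact h2⟩)
    obtain ⟨L', h1, h2, h3⟩ := ih L1 (hlen1.trans hL)
      (fun q hq => hpre q (List.mem_cons_of_mem p hq))
    refine ⟨L', by simpa [hm] using h1, h2, ?_⟩
    intro i
    rw [h3 i, hpt1 i]
    have hcov : pvCov (p :: rest) (i : Int)
        = (if p.1 ≤ (i : Int) ∧ (i : Int) < p.2 then 1 else 0) + pvCov rest (i : Int) := by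
      by_cases hc : p.1 ≤ (i : Int) ∧ (i : Int) < p.2
      · simp [pvCov, hc, Nat.add_comm]
      · simp [pvCov, hc]
    rw [hcov]
    split_ifs with hc
    · simp
    · constructor
      · rintro (h | h)
        · exact Or.inl h
        · exact Or.inr (by omega)
      · rintro (h | h)
        · exact Or.inl h
        · exact Or.inr (by omega)

lemma pvDelta_spec (n : Nat) (spans : List (Int × Int)) (d0 : List Int)
    (hd : d0.length = n + 1)
    (hpre : ∀ p ∈ spans, p.1 < p.2 → 0 ≤ p.1 ∧ p.2 ≤ (n : Int)) :
    (spans.foldl (pvDeltaStep n) d0).length = n + 1 ∧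
      ∀ k : Nat, k < n →
        pvPsum (spans.foldl (pvDeltaStep n) d0) (k + 1)
          = pvPsum d0 (k + 1) + (pvCov spans (k : Int) : Int) := by
  induction spans generalizing d0 with
  | nil => exact ⟨hd, fun k _ => by simp [pvCov]⟩
  | cons p rest ih =>
    have hcov : ∀ k : Nat, (pvCov (p :: rest) (k : Int) : Int)
        = (if p.1 ≤ (k : Int) ∧ (k : Int) < p.2 then 1 else 0) + (pvCov rest (k : Int) : Int) := by
      intro k
      by_cases hc : p.1 ≤ (k : Int) ∧ (k : Int) < p.2
      · simp [pvCov, hc]; ring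
      · simp [pvCov, hc]
    by_cases hlt : p.1 < p.2
    · obtain ⟨hs0, hen⟩ := hpre p (List.mem_cons_self) hlt
      have hsx : max p.1 0 = p.1 := by omega
      have hex : min p.2 (n : Int) = p.2 := by omega
      have hd1 : pvDeltaStep n d0 p = (d0.modify p.1.toNat (· + 1)).modify p.2.toNat (· - 1) := by
        simp [pvDeltaStep, hsx, hex, hlt]
      have hjs : p.1.toNat < d0.length := by omega
      have hje : p.2.toNat < (d0.modify p.1.toNat (· + 1)).length := by
        simp [List.length_modify]; omega
      obtain ⟨hlen', hsum'⟩ := ih (pvDeltaStep n d0 p)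
        (by rw [hd1]; simp [List.length_modify, hd])
        (fun q hq => hpre q (List.mem_cons_of_mem p hq))
      refine ⟨by simpa using hlen', ?_⟩
      intro k hk
      have h1 := hsum' k hk
      simp only [List.foldl_cons] at *
      rw [h1, hd1]
      simp only [sub_eq_add_neg]
      rw [pvPsum_modify _ _ _ _ hje, pvPsum_modify _ _ _ _ hjs, hcov k]
      have e1 : (p.1.toNat : Int) = p.1 := by omega
      have e2 : (p.2.toNat : Int) = p.2 := by omega
      split_ifs <;> omega
    · have hd1 : pvDeltaStep n d0 p = d0 := by
        have : ¬ (max p.1 0 < min p.2 (n : Int)) := by omega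
        simp [pvDeltaStep, this]
      obtain ⟨hlen', hsum'⟩ := ih d0 hd (fun q hq => hpre q (List.mem_cons_of_mem p hq))
      refine ⟨by simpa [hd1] using hlen', ?_⟩
      intro k hk
      have h1 := hsum' k hk
      simp only [List.foldl_cons, hd1]
      rw [h1, hcov k]
      have : ¬ (p.1 ≤ (k : Int) ∧ (k : Int) < p.2) := by omega
      simp [this]

lemma pvPsum_cons (d : Int) (ds : List Int) (k : Nat) :
    pvPsum (d :: ds) (k + 1) = d + pvPsum ds k := by simp [pvPsum]

lemma pvEmit_eq : ∀ (L : List Nat) (ds : List Int) (active np : Int),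
    L.length = ds.length →
    (∀ i : Nat, i < L.length → (L.getD i 0 ≠ 0 ↔ 0 < active + pvPsum ds (i + 1))) →
    pvEmitA L np = pvEmitB ds active np := by
  intro L
  induction L with
  | nil =>
    intro ds active np hlen _
    cases ds with
    | nil => simp [pvEmitA, pvEmitB]
    | cons d ds' => simp at hlen
  | cons b L ih =>
    intro ds active np hlen hpt
    cases ds with
    | nil => simp at hlen
    | cons d ds' =>
      have h0 : (b ≠ 0) ↔ 0 < active + d := by
        simpa [pvPsum] using hpt 0 (by simp)
      have htail : ∀ i : Nat, i < L.length →
          (L.getD i 0 ≠ 0 ↔ 0 < (active + d) + pvPsum ds' (i + 1)) := by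
        intro i hi
        have := hpt (i + 1) (by simpa using Nat.succ_lt_succ hi)
        rw [pvPsum_cons] at this
        simpa [add_assoc] using this
      have hrec := fun np' => ih ds' (active + d) np' (by simpa using hlen) htail
      by_cases hb : b = 0
      · have hnp : ¬ 0 < active + d := by rw [← h0]; simp [hb]
        simp [pvEmitA, pvEmitB, hb, hnp, hrec]
      · have hnp : 0 < active + d := h0.mp hb
        simp [pvEmitA, pvEmitB, hb, hnp, hrec]

-- ===== VERDICT (by name: the statement is the Claim_ definition above) =====
theorem build_offset_map_spec : Claim_equal_build_offset_map := by
  intro text spans _ hpre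
  unfold Spec_build_offset_map build_offset_map build_offset_map_alt
  set n := text.toList.length with hn
  obtain ⟨L', hfold, hlen, hpt⟩ := pvMarkAll_spec n spans (List.replicate n 0) (by simp) hpre
  obtain ⟨hdlen, hdsum⟩ := pvDelta_spec n spans (List.replicate (n + 1) 0) (by simp) hpre
  simp only [hfold]
  apply pvEmit_eq
  · simp [hlen, hdlen]
  · intro i hi
    rw [hlen] at hi
    have h1 := hpt i
    have h2 := hdsum i hi
    have htake : pvPsum ((spans.foldl (pvDeltaStep n) (List.replicate (n + 1) 0)).take n) (i + 1)
        = pvPsum (spans.foldl (pvDeltaStep n) (List.replicate (n + 1) 0)) (i + 1) := by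
      simp [pvPsum, List.take_take, Nat.min_eq_left (by omega : i + 1 ≤ n)]
    rw [htake, h2, h1]
    have h0 : pvPsum (List.replicate (n + 1) (0 : Int)) (i + 1) = 0 := by
      simp [pvPsum]
    rw [h0]
    simp
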